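-- pv_equiv track=rewrite | github.com/lasyaramakrishnan/CIS61 | labs/lab05.py | add_chars
-- ===== SOURCE A (Python) =====
-- def add_chars(w1, w2):
--     """
--     Return a string containing the characters you need to add to w1 to get w2.
--     You may assume that w1 is a subsequence of w2.
--
--     >>> add_chars("owl", "howl")
--     'h'
--     >>> add_chars("want", "wanton")
--     'on'
--     >>> add_chars("rat", "radiate")
--     'diae'
--     >>> add_chars("a", "prepare")
--     'prepre'
--     >>> add_chars("resin", "recursion")
--     'curo'
--     >>> add_chars("fin", "effusion")
--     'efuso'
--     >>> add_chars("coy", "cacophony")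
--     'acphon'
--     """
--     "*** YOUR CODE HERE ***"
--
--     if len(w1) == 0:
--         return w2
--     if len(w2) == 0:
--         return ''
--     elif w1[0] == w2[0]:
--         return add_chars(w1[1:], w2[1:])
--     else:
--         return w2[0] + add_chars(w1, w2[1:])
-- ===== SOURCE B (Python) =====
-- def add_chars(w1, w2):
--     out = []
--     i = 0
--     for c in w2:
--         if i < len(w1) and w1[i] == c:
--             i += 1
--         else:
--             out.append(c)
--     return ''.join(out)
-- ===== Notes on version B (the rewrite author's own statement) =====
-- stated objective: faster
-- what changed: Replaced the recursive implementation that slices both strings at each step with a single iterative two-pointer pass over w2 that appends unmatched characters to a list and joins once.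
import Mathlib
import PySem

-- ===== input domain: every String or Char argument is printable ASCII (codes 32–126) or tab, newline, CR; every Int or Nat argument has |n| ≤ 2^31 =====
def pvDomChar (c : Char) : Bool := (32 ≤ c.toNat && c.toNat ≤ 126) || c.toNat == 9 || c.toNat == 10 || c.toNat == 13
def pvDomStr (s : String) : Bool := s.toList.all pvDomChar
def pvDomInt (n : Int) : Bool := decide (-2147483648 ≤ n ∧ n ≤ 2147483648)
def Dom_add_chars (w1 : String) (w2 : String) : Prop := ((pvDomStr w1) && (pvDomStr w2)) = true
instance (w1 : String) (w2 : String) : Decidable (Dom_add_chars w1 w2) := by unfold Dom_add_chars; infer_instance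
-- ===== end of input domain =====

-- B replaces A's O(n^2) slice-and-recurse with a single O(n) two-pointer pass over w2.


-- ===== PORT A =====
-- A's recursion, step for step, over List Char (strings bridged via toList/mk)
def addCharsRec : List Char → List Char → List Char
  | [], w2 => w2
  | _ :: _, [] => []
  | c1 :: t1, c2 :: t2 =>
    if c1 == c2 then addCharsRec t1 t2
    else c2 :: addCharsRec (c1 :: t1) t2
termination_by w1 w2 => w2.length

def add_chars (w1 : String) (w2 : String) : String :=
  String.mk (addCharsRec w1.toList w2.toList)

-- ===== PORT B =====
-- Source B's loop: fold over w2 with state (i, out); append c when it does not match w1[i]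
def add_chars_alt (w1 : String) (w2 : String) : String :=
  let l1 := w1.toList
  let st := w2.toList.foldl
    (fun (st : Nat × List Char) c =>
      if st.1 < l1.length && l1.getD st.1 ' ' == c then (st.1 + 1, st.2)
      else (st.1, st.2 ++ [c]))
    (0, [])
  String.mk st.2

-- ===== PRECONDITION & SPEC =====
def Spec_add_chars (w1 : String) (w2 : String) (out : String) : Prop := out = add_chars_alt w1 w2
instance (w1 : String) (w2 : String) (out : String) : Decidable (Spec_add_chars w1 w2 out) := by unfold Spec_add_chars; infer_instance

-- ===== CLAIM (what is proved, stated in full; the proofs are below) =====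
def Claim_equal_add_chars : Prop := ∀ (w1 : String) (w2 : String), Dom_add_chars w1 w2 → Spec_add_chars w1 w2 (add_chars w1 w2)

-- ===== LEMMAS AND PROOFS =====

-- loop invariant: the fold from state (i, acc) produces acc ++ A's result on (w1.drop i, w2)
theorem foldl_eq_rec (l1 : List Char) (w2 : List Char) :
    ∀ (i : Nat) (acc : List Char),
    (w2.foldl
      (fun (st : Nat × List Char) c =>
        if st.1 < l1.length && l1.getD st.1 ' ' == c then (st.1 + 1, st.2)
        else (st.1, st.2 ++ [c]))
      (i, acc)).2 = acc ++ addCharsRec (l1.drop i) w2 := by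
  induction w2 with
  | nil =>
    intro i acc
    cases h : l1.drop i <;> simp [List.foldl, addCharsRec]
  | cons c t ih =>
    intro i acc
    by_cases hi : i < l1.length
    · have hdrop : l1.drop i = l1[i] :: l1.drop (i + 1) := List.drop_eq_getElem_cons hi
      have hgetD : l1.getD i ' ' = l1[i] := List.getD_eq_getElem l1 ' ' hi
      by_cases hc : l1[i] = c
      · have hcond : (decide (i < l1.length) && (l1.getD i ' ' == c)) = true := by
          rw [hgetD]; simp [hi, hc]
        rw [List.foldl_cons, if_pos hcond, ih (i + 1) acc, hdrop]
        simp [addCharsRec, hc]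
      · have hcond : (decide (i < l1.length) && (l1.getD i ' ' == c)) = false := by
          rw [hgetD]; simp [hc]
        rw [List.foldl_cons, if_neg (by rw [hcond]; simp), ih i (acc ++ [c])]
        rw [hdrop]
        simp only [addCharsRec]
        rw [if_neg (by simp [hc])]
        simp
    · have hdrop : l1.drop i = [] := List.drop_eq_nil_of_le (by omega)
      have hcond : (decide (i < l1.length) && (l1.getD i ' ' == c)) = false := by
        simp [hi]
      rw [List.foldl_cons, if_neg (by rw [hcond]; simp), ih i (acc ++ [c]), hdrop]
      simp [addCharsRec]

-- ===== VERDICT (by name: the statement is the Claim_ definition above) =====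
theorem add_chars_spec : Claim_equal_add_chars := by
  intro w1 w2 _
  unfold Spec_add_chars add_chars add_chars_alt
  have h := foldl_eq_rec w1.toList w2.toList 0 []
  simp only [List.nil_append, List.drop_zero] at h
  exact congrArg String.mk h.symm
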